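-- pv_equiv track=rewrite | github.com/YanliangZhou/Pythonstar | symmetry_generator/firstpart_permutation.py | p6
-- ===== SOURCE A (Python) =====
-- def p6(n):
--     '''combination'''
--     List = []
--     for g in range(1, n + 1):
--         for h in range( 1, n + 1):
--             for i in range(1, n + 1):
--                 for j in range(1, n + 1):
--                     for k in range(1, n + 1):
--                         for m in range(1, n + 1):
--                             if len(set((g, h, i, j, k, m))) == 6:  # 去重后长度仍为3的话说明i,j,k的值都不相同
--                                 one = 'Z'+str(g)
--                                 two = 'Z'+str(h)
--                                 three = 'Z'+str(i)
--                                 four = 'Z'+str(j)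
--                                 five = 'Z'+str(k)
--                                 six = 'Z' + str(m)
--                                 l = ','.join(list((one, two, three, four, five, six)))
--                                 List.append(l)
--     List.append('')
--     # finallist = ','.join(List)
--     return List
-- ===== SOURCE B (Python) =====
-- def p6(n):
--     vals = range(1, n + 1)
--     prefixes = [()]
--     for _ in range(6):
--         prefixes = [p + (x,) for p in prefixes for x in vals if x not in p]
--     out = [','.join('Z' + str(v) for v in p) for p in prefixes]
--     out.append('')
--     return out
-- ===== Notes on version B (the rewrite author's own statement) =====
-- stated objective: alternative
-- what changed: B grows valid partial permutations one position at a time, extending only with values not already used, instead of A's six nested loops over every tuple with a set-cardinality rejection test.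
import Mathlib
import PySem

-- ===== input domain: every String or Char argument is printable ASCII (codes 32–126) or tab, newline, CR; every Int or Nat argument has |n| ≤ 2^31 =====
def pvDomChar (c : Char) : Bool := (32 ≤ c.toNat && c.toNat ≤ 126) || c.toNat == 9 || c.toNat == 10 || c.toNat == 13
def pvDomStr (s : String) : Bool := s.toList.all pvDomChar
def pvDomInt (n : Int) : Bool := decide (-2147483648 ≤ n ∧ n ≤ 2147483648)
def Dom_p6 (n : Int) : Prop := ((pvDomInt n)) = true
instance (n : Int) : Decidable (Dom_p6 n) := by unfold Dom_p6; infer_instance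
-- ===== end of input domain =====

-- B generates only valid partial permutations, extending prefixes with unused values, instead of A's six nested loops with a set-cardinality rejection test.

-- ===== PORT A =====
def p6 (n : Int) : List String :=
  let L : List String :=
    (PySem.List.pyRange 1 (n + 1) 1).foldl (fun L g =>
      (PySem.List.pyRange 1 (n + 1) 1).foldl (fun L h =>
        (PySem.List.pyRange 1 (n + 1) 1).foldl (fun L i =>
          (PySem.List.pyRange 1 (n + 1) 1).foldl (fun L j =>
            (PySem.List.pyRange 1 (n + 1) 1).foldl (fun L k =>
              (PySem.List.pyRange 1 (n + 1) 1).foldl (fun L m =>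
                if PySem.Set.len (PySem.Set.ofList [g, h, i, j, k, m]) == 6 then
                  let one := "Z" ++ PySem.Int.toStr g
                  let two := "Z" ++ PySem.Int.toStr h
                  let three := "Z" ++ PySem.Int.toStr i
                  let four := "Z" ++ PySem.Int.toStr j
                  let five := "Z" ++ PySem.Int.toStr k
                  let six := "Z" ++ PySem.Int.toStr m
                  let l := PySem.Str.join "," [one, two, three, four, five, six]
                  L ++ [l]
                else L) L) L) L) L) L) []
  L ++ [""]

-- ===== PORT B =====
def pvFmt (p : List Int) : String :=
  PySem.Str.join "," (p.map (fun v => "Z" ++ PySem.Int.toStr v))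

def pvExtend (vals : List Int) (ps : List (List Int)) : List (List Int) :=
  ps.flatMap (fun p => (vals.filter (fun x => decide (x ∉ p))).map (fun x => p ++ [x]))

def p6_alt (n : Int) : List String :=
  let vals := PySem.List.pyRange 1 (n + 1) 1
  let prefixes := (List.range 6).foldl (fun ps _ => pvExtend vals ps) [[]]
  prefixes.map pvFmt ++ [""]

-- ===== PRECONDITION & SPEC =====
def Spec_p6 (n : Int) (out : List String) : Prop := out = p6_alt n
instance (n : Int) (out : List String) : Decidable (Spec_p6 n out) := by unfold Spec_p6; infer_instance

-- ===== CLAIM (what is proved, stated in full; the proofs are below) =====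
def Claim_equal_p6 : Prop := ∀ (n : Int), Dom_p6 n → Spec_p6 n (p6 n)

-- ===== LEMMAS AND PROOFS =====

-- A's nested loops, abstracted over the value list r, with the prefix accumulated in q.
def pvH (r : List Int) : Nat → List Int → List String
  | 0, q => if q.Nodup then [pvFmt q] else []
  | k + 1, q => r.flatMap (fun x => pvH r k (q ++ [x]))

-- iterated pvExtend, peeling from the left (matches B's foldl)
def pvGoL (r : List Int) : Nat → List (List Int) → List (List Int)
  | 0, l => l
  | k + 1, l => pvGoL r k (pvExtend r l)

theorem pvOfList_sublist (l : List Int) : (PySem.Set.ofList l).Sublist l := by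
  induction l using List.reverseRecOn with
  | nil => simp [PySem.Set.ofList_nil]
  | append_singleton xs x ih =>
    rw [PySem.Set.ofList_append_singleton, PySem.Set.add_eq_ite]
    split_ifs with hx
    · exact ih.trans (List.sublist_append_left xs [x])
    · exact List.Sublist.append ih (List.Sublist.refl [x])

theorem pvSet_len_eq_iff_nodup (l : List Int) :
    ((PySem.Set.ofList l).length = l.length) ↔ l.Nodup := by
  constructor
  · intro h
    have := (pvOfList_sublist l).eq_of_length h
    rw [← this]
    exact PySem.Set.nodup_ofList l
  · intro h
    rw [PySem.Set.ofList_eq_self_of_nodup l h]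

theorem pvCond_eq (g h i j k m : Int) :
    (PySem.Set.len (PySem.Set.ofList [g, h, i, j, k, m]) == 6) =
      decide ([g, h, i, j, k, m].Nodup) := by
  have hlen : PySem.Set.len (PySem.Set.ofList [g, h, i, j, k, m]) =
      ((PySem.Set.ofList [g, h, i, j, k, m]).length : Int) := by
    simp [PySem.Set.len]
  rw [hlen]
  by_cases hn : [g, h, i, j, k, m].Nodup
  · have := (pvSet_len_eq_iff_nodup [g, h, i, j, k, m]).2 hn
    simp [this, hn]
  · have : (PySem.Set.ofList [g, h, i, j, k, m]).length ≠ 6 := by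
      intro he
      exact hn ((pvSet_len_eq_iff_nodup [g, h, i, j, k, m]).1 (by simp [he]))
    simp [hn]
    omega
  
theorem pvH_vanish (r : List Int) (k : Nat) (q : List Int) (hq : ¬ q.Nodup) :
    pvH r k q = [] := by
  induction k generalizing q with
  | zero => simp [pvH, hq]
  | succ k ih =>
    simp only [pvH]
    rw [List.flatMap_eq_nil_iff]
    intro x _
    exact ih (q ++ [x]) (fun hn => hq (hn.sublist (List.sublist_append_left q [x])))

theorem pvFlatMap_congr {α β : Type} (l : List α) (f g : α → List β)
    (h : ∀ a ∈ l, f a = g a) : l.flatMap f = l.flatMap g := by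
  induction l with
  | nil => rfl
  | cons x xs ih =>
    simp only [List.flatMap_cons]
    rw [h x (List.mem_cons_self), ih (fun a ha => h a (List.mem_cons_of_mem x ha))]

theorem pvFilter_map_flatMap {α β γ : Type} (r : List α) (q : α → Bool) (f : α → β)
    (g : β → List γ) : ((r.filter q).map f).flatMap g
      = r.flatMap (fun x => if q x then g (f x) else []) := by
  induction r with
  | nil => rfl
  | cons x xs ih =>
    by_cases hx : q x <;> simp [hx, ih]

theorem pvFilter_map_eq_flatMap {α β : Type} (r : List α) (q : α → Bool) (f : α → β) :
    (r.filter q).map f = r.flatMap (fun x => if q x then [f x] else []) := by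
  induction r with
  | nil => rfl
  | cons x xs ih =>
    by_cases hx : q x <;> simp [hx, ih]

theorem pvFlatMap_assoc {α β γ : Type} (l : List α) (f : α → List β) (g : β → List γ) :
    (l.flatMap f).flatMap g = l.flatMap (fun x => (f x).flatMap g) := by
  induction l with
  | nil => rfl
  | cons x xs ih => simp [List.flatMap_cons, List.flatMap_append, ih]

theorem pvStep (r : List Int) (k : Nat) (l : List (List Int)) :
    l.flatMap (pvH r (k + 1)) = (pvExtend r l).flatMap (pvH r k) := by
  unfold pvExtend
  rw [pvFlatMap_assoc]
  refine pvFlatMap_congr l _ _ (fun p hp => ?_)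
  rw [pvFilter_map_flatMap]
  simp only [pvH]
  refine pvFlatMap_congr r _ _ (fun x _ => ?_)
  by_cases hx : x ∈ p
  · have : ¬ (p ++ [x]).Nodup := by
      intro hn
      have := List.disjoint_of_nodup_append hn
      exact this hx (List.mem_singleton_self x)
    simp [hx, pvH_vanish r k _ this]
  · simp [hx]

theorem pvExtend_nodup (r : List Int) (l : List (List Int))
    (hl : ∀ p ∈ l, p.Nodup) : ∀ p ∈ pvExtend r l, p.Nodup := by
  intro p hp
  unfold pvExtend at hp
  simp only [List.mem_flatMap, List.mem_map, List.mem_filter] at hp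
  obtain ⟨q, hq, x, ⟨hxr, hxq⟩, rfl⟩ := hp
  have hxq' : x ∉ q := by simpa using hxq
  simp only [List.nodup_append, List.nodup_singleton, true_and]
  refine ⟨hl q hq, ?_⟩
  intro a ha b hb heq
  rw [List.mem_singleton] at hb
  subst hb; subst heq
  exact hxq' ha

theorem pvFlatMap_single {α β : Type} (l : List α) (f : α → β) :
    l.flatMap (fun x => [f x]) = l.map f := by
  induction l with
  | nil => rfl
  | cons x xs ih => simp [List.flatMap_cons, ih]

theorem pvKey (r : List Int) (k : Nat) (l : List (List Int))
    (hl : ∀ p ∈ l, p.Nodup) :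
    l.flatMap (pvH r k) = (pvGoL r k l).flatMap (pvH r 0) := by
  induction k generalizing l with
  | zero => rfl
  | succ k ih =>
    rw [pvStep r k l, pvGoL]
    exact ih (pvExtend r l) (pvExtend_nodup r l hl)

theorem pvGoL_nodup (r : List Int) (k : Nat) (l : List (List Int))
    (hl : ∀ p ∈ l, p.Nodup) : ∀ p ∈ pvGoL r k l, p.Nodup := by
  induction k generalizing l with
  | zero => exact hl
  | succ k ih => exact ih (pvExtend r l) (pvExtend_nodup r l hl)

theorem pvFoldl_range_eq_goL (r : List Int) (k : Nat) :
    (List.range k).foldl (fun ps _ => pvExtend r ps) [[]] = pvGoL r k [[]] := by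
  have main : ∀ (k : Nat) (l : List (List Int)),
      (List.range k).foldl (fun ps _ => pvExtend r ps) l = pvGoL r k l := by
    intro k
    induction k with
    | zero => intro l; rfl
    | succ k ih =>
      intro l
      rw [List.range_succ_eq_map]
      simp only [List.foldl_cons, List.foldl_map]
      rw [pvGoL]
      exact ih (pvExtend r l)
  exact main k [[]]

theorem pvA_core_eq (r : List Int) :
    r.foldl (fun L g =>
      r.foldl (fun L h =>
        r.foldl (fun L i =>
          r.foldl (fun L j =>
            r.foldl (fun L k =>
              r.foldl (fun L m =>
                if PySem.Set.len (PySem.Set.ofList [g, h, i, j, k, m]) == 6 then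
                  L ++ [PySem.Str.join "," ["Z" ++ PySem.Int.toStr g, "Z" ++ PySem.Int.toStr h,
                    "Z" ++ PySem.Int.toStr i, "Z" ++ PySem.Int.toStr j,
                    "Z" ++ PySem.Int.toStr k, "Z" ++ PySem.Int.toStr m]]
                else L) L) L) L) L) L) []
    = pvH r 6 [] := by
  simp only [PySem.List.foldl_append_if, PySem.List.foldl_append_eq_flatMap,
    List.nil_append]
  simp only [pvH, List.nil_append]
  refine pvFlatMap_congr r _ _ (fun g _ => ?_)
  refine pvFlatMap_congr r _ _ (fun h _ => ?_)
  refine pvFlatMap_congr r _ _ (fun i _ => ?_)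
  refine pvFlatMap_congr r _ _ (fun j _ => ?_)
  refine pvFlatMap_congr r _ _ (fun k _ => ?_)
  simp only [pvCond_eq, pvFilter_map_eq_flatMap]
  refine pvFlatMap_congr r _ _ (fun m _ => ?_)
  by_cases hn : [g, h, i, j, k, m].Nodup <;>
    simp [hn, pvFmt]

-- ===== VERDICT (by name: the statement is the Claim_ definition above) =====
theorem p6_spec : Claim_equal_p6 := by
  intro n _
  show p6 n = p6_alt n
  show ((PySem.List.pyRange 1 (n + 1) 1).foldl (fun L g =>
      (PySem.List.pyRange 1 (n + 1) 1).foldl (fun L h =>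
        (PySem.List.pyRange 1 (n + 1) 1).foldl (fun L i =>
          (PySem.List.pyRange 1 (n + 1) 1).foldl (fun L j =>
            (PySem.List.pyRange 1 (n + 1) 1).foldl (fun L k =>
              (PySem.List.pyRange 1 (n + 1) 1).foldl (fun L m =>
                if PySem.Set.len (PySem.Set.ofList [g, h, i, j, k, m]) == 6 then
                  L ++ [PySem.Str.join "," ["Z" ++ PySem.Int.toStr g, "Z" ++ PySem.Int.toStr h,
                    "Z" ++ PySem.Int.toStr i, "Z" ++ PySem.Int.toStr j,
                    "Z" ++ PySem.Int.toStr k, "Z" ++ PySem.Int.toStr m]]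
                else L) L) L) L) L) L) []) ++ [""]
    = ((List.range 6).foldl (fun ps _ => pvExtend (PySem.List.pyRange 1 (n + 1) 1) ps)
        [[]]).map pvFmt ++ [""]
  set r := PySem.List.pyRange 1 (n + 1) 1 with hr
  rw [pvFoldl_range_eq_goL r 6, pvA_core_eq r]
  have hnil : ∀ p ∈ ([[]] : List (List Int)), p.Nodup := by
    intro p hp; simp at hp; simp [hp]
  have h1 : pvH r 6 [] = ([[]] : List (List Int)).flatMap (pvH r 6) := by
    simp
  rw [h1, pvKey r 6 [[]] hnil]
  have h2 : (pvGoL r 6 [[]]).flatMap (pvH r 0) = (pvGoL r 6 [[]]).map pvFmt := by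
    have := pvGoL_nodup r 6 [[]] hnil
    rw [← pvFlatMap_single (pvGoL r 6 [[]]) pvFmt]
    refine pvFlatMap_congr _ _ _ (fun p hp => ?_)
    simp [pvH, this p hp]
  rw [h2]
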